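-- pv_equiv track=rewrite | github.com/Revi1337/BaekJoon-Coding-Test | 백준/Silver/2607. 비슷한 단어/비슷한 단어.py | solution
-- ===== SOURCE A (Python) =====
-- def solution(N, S):
--     init, ans = S[0], 0
--     for s in S[1:]:
--         ichars, cnt = list(init), 0
--         for char in s:
--             if char in ichars:
--                 ichars.remove(char)
--             else:
--                 cnt += 1
--         if cnt < 2 and len(ichars) < 2:
--             ans += 1
--
--     return ans
-- ===== SOURCE B (Python) =====
-- def solution(N, S):
--     init = S[0]
--     a = sorted(init)
--     ans = 0
--     for s in S[1:]:
--         b = sorted(s)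
--         i = j = matched = 0
--         while i < len(a) and j < len(b):
--             if a[i] == b[j]:
--                 matched += 1
--                 i += 1
--                 j += 1
--             elif a[i] < b[j]:
--                 i += 1
--             else:
--                 j += 1
--         if len(s) - matched < 2 and len(init) - matched < 2:
--             ans += 1
--     return ans
-- ===== Notes on version B (the rewrite author's own statement) =====
-- stated objective: alternative
-- what changed: A repeatedly scans and mutates a copy of S[0] for every character of every word (membership test + remove); B sorts S[0] once and each word once, then counts multiset matches with a two-pointer merge over the two sorted lists.
-- outside the precondition, e.g. on solution(0, []): A raises IndexError, B raises IndexError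
import Mathlib
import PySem

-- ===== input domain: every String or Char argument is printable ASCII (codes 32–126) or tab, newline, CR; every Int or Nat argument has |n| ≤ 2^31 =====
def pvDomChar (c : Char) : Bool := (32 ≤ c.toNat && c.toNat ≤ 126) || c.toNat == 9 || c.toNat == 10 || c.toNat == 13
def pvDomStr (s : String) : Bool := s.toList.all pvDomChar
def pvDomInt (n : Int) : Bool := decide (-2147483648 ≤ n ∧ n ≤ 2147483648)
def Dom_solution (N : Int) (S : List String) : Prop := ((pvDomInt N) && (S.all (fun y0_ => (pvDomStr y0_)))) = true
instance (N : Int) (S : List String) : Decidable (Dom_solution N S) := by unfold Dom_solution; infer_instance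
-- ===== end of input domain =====

-- B replaces A's per-character membership-scan-and-remove over a mutable copy of S[0]
-- by sorting both words once and counting matches with a two-pointer merge (alternative algorithm).

-- ===== PORT A =====
-- inner loop of A: fold over the chars of s with state (ichars, cnt)
def pvAInner (ichars : List Char) (s : List Char) : List Char × Nat :=
  s.foldl (fun st c => if c ∈ st.1 then (st.1.erase c, st.2) else (st.1, st.2 + 1)) (ichars, 0)

def solution (_N : Int) (S : List String) : Int :=
  match S with
  | [] => 0   -- S[0] raises IndexError in Python; excluded by Pre_solution
  | init :: rest =>
    rest.foldl (fun ans s =>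
      let r := pvAInner init.toList s.toList
      if r.2 < 2 ∧ r.1.length < 2 then ans + 1 else ans) 0

-- ===== PORT B =====
-- two-pointer merge over two sorted lists, counting equal pairs (the while-loop of Source B)
def pvMergeMatched : List Char → List Char → Nat
  | [], _ => 0
  | _ :: _, [] => 0
  | x :: xs, y :: ys =>
    if x = y then pvMergeMatched xs ys + 1
    else if x < y then pvMergeMatched xs (y :: ys)
    else pvMergeMatched (x :: xs) ys
  termination_by xs ys => xs.length + ys.length

def solution_alt (_N : Int) (S : List String) : Int :=
  match S with
  | [] => 0   -- S[0] raises IndexError in Python; excluded by Pre_solution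
  | init :: rest =>
    let a := init.toList.mergeSort (fun c d => decide (c ≤ d))
    rest.foldl (fun ans s =>
      let b := s.toList.mergeSort (fun c d => decide (c ≤ d))
      let matched := pvMergeMatched a b
      if (s.toList.length : Int) - matched < 2 ∧ (init.toList.length : Int) - matched < 2
      then ans + 1 else ans) 0

-- ===== PRECONDITION & SPEC =====
-- Pre_ excludes only the empty list S, on which Python A (and B) raise IndexError at S[0].
def Pre_solution (N : Int) (S : List String) : Prop := S ≠ []
instance (N : Int) (S : List String) : Decidable (Pre_solution N S) := by
  unfold Pre_solution; infer_instance

def pvWitness_solution : Int × List String := (3, ["abc", "bca", "axc"])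

def Spec_solution (N : Int) (S : List String) (out : Int) : Prop := out = solution_alt N S
instance (N : Int) (S : List String) (out : Int) : Decidable (Spec_solution N S out) := by
  unfold Spec_solution; infer_instance

-- ===== CLAIM (what is proved, stated in full; the proofs are below) =====
def Claim_equal_solution : Prop :=
  ∀ (N : Int) (S : List String), Dom_solution N S → Pre_solution N S →
    Spec_solution N S (solution N S)

-- ===== LEMMAS AND PROOFS =====

-- A's inner loop, characterised by multisets: the leftover ichars is the truncated
-- difference l - s, and cnt counts the chars of s not matched, i.e. card (s - l).
theorem pvAInner_fold (s : List Char) : ∀ (l : List Char) (n : Nat),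
    ((s.foldl (fun st c => if c ∈ st.1 then (st.1.erase c, st.2) else (st.1, st.2 + 1)) (l, n)).1
      : Multiset Char) = (l : Multiset Char) - (s : Multiset Char) ∧
    (s.foldl (fun st c => if c ∈ st.1 then (st.1.erase c, st.2) else (st.1, st.2 + 1)) (l, n)).2
      = n + Multiset.card ((s : Multiset Char) - (l : Multiset Char)) := by
  induction s with
  | nil => intro l n; simp
  | cons c s ih =>
    intro l n
    simp only [List.foldl_cons]
    by_cases hc : c ∈ l
    · have hcp : 0 < l.count c := List.count_pos_iff.mpr hc
      simp only [hc, if_pos]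
      obtain ⟨h1, h2⟩ := ih (l.erase c) n
      constructor
      · rw [h1]
        refine Multiset.ext.mpr fun a => ?_
        simp only [Multiset.count_sub, Multiset.coe_count]
        by_cases hac : a = c
        · subst hac
          simp only [List.count_cons_self, List.count_erase_self] <;> omega
        · simp only [List.count_cons_of_ne (Ne.symm hac), List.count_erase_of_ne hac] <;> omega
      · rw [h2]
        have hms : ((s : Multiset Char) - (l.erase c : Multiset Char))
            = ((c :: s : List Char) : Multiset Char) - (l : Multiset Char) := by
          refine Multiset.ext.mpr fun a => ?_
          simp only [Multiset.count_sub, Multiset.coe_count]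
          by_cases hac : a = c
          · subst hac
            simp only [List.count_cons_self, List.count_erase_self] <;> omega
          · simp only [List.count_cons_of_ne (Ne.symm hac), List.count_erase_of_ne hac] <;> omega
        rw [hms]
    · have hc0 : l.count c = 0 := List.count_eq_zero.mpr hc
      simp only [hc, if_false]
      obtain ⟨h1, h2⟩ := ih l (n + 1)
      constructor
      · rw [h1]
        refine Multiset.ext.mpr fun a => ?_
        simp only [Multiset.count_sub, Multiset.coe_count]
        by_cases hac : a = c
        · subst hac
          simp only [List.count_cons_self] <;> omega
        · simp only [List.count_cons_of_ne (Ne.symm hac)] <;> omega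
      · rw [h2]
        have hms : ((c :: s : List Char) : Multiset Char) - (l : Multiset Char)
            = c ::ₘ ((s : Multiset Char) - (l : Multiset Char)) := by
          refine Multiset.ext.mpr fun a => ?_
          by_cases hac : a = c
          · subst hac
            simp only [Multiset.count_sub, Multiset.coe_count, List.count_cons_self,
              Multiset.count_cons_self] <;> omega
          · simp only [Multiset.count_sub, Multiset.coe_count, List.count_cons_of_ne (Ne.symm hac),
              Multiset.count_cons_of_ne hac] <;> omega
        rw [hms]
        simp only [Multiset.card_cons]
        omega

-- cons on both sides of an intersection
theorem inter_cons_cons (a : Char) (s t : Multiset Char) :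
    (a ::ₘ s) ∩ (a ::ₘ t) = a ::ₘ (s ∩ t) := by
  refine Multiset.ext.mpr fun b => ?_
  by_cases hb : b = a
  · subst hb
    simp only [Multiset.count_inter, Multiset.count_cons_self] <;> omega
  · simp only [Multiset.count_inter, Multiset.count_cons_of_ne hb] <;> omega

theorem inter_cons_left_of_notMem {a : Char} {t : Multiset Char} (h : a ∉ t) (s : Multiset Char) :
    (a ::ₘ s) ∩ t = s ∩ t := by
  have h0 : t.count a = 0 := Multiset.count_eq_zero.mpr h
  refine Multiset.ext.mpr fun b => ?_
  by_cases hb : b = a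
  · subst hb
    simp only [Multiset.count_inter, Multiset.count_cons_self, h0] <;> omega
  · simp only [Multiset.count_inter, Multiset.count_cons_of_ne hb] <;> omega

theorem inter_cons_right_of_notMem {a : Char} {s : Multiset Char} (h : a ∉ s) (t : Multiset Char) :
    s ∩ (a ::ₘ t) = s ∩ t := by
  have h0 : s.count a = 0 := Multiset.count_eq_zero.mpr h
  refine Multiset.ext.mpr fun b => ?_
  by_cases hb : b = a
  · subst hb
    simp only [Multiset.count_inter, Multiset.count_cons_self, h0] <;> omega
  · simp only [Multiset.count_inter, Multiset.count_cons_of_ne hb] <;> omega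

-- the merge counter on sorted lists computes the cardinality of the multiset intersection
theorem pvMergeMatched_eq_inter_card : ∀ (xs ys : List Char),
    List.Pairwise (· ≤ ·) xs → List.Pairwise (· ≤ ·) ys →
    pvMergeMatched xs ys
      = Multiset.card ((xs : Multiset Char) ∩ (ys : Multiset Char)) := by
  intro xs ys
  induction xs, ys using pvMergeMatched.induct with
  | case1 ys => intro _ _; simp [pvMergeMatched]
  | case2 x xs => intro _ _; simp [pvMergeMatched]
  | case3 xs y ys ih =>
    intro hx hy
    simp only [pvMergeMatched, if_true]
    rw [ih (List.Pairwise.of_cons hx) (List.Pairwise.of_cons hy)]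
    simp only [← Multiset.cons_coe, inter_cons_cons, Multiset.card_cons]
  | case4 x xs y ys hne hlt ih =>
    intro hx hy
    simp only [pvMergeMatched, if_neg hne, if_pos hlt]
    rw [ih (List.Pairwise.of_cons hx) hy]
    have hnot : x ∉ ((y :: ys : List Char) : Multiset Char) := by
      simp only [Multiset.mem_coe, List.mem_cons]
      rintro (rfl | hmem)
      · exact lt_irrefl x hlt
      · exact absurd (List.rel_of_pairwise_cons hy hmem) (not_le.mpr hlt)
    calc Multiset.card ((xs : Multiset Char) ∩ ((y :: ys : List Char) : Multiset Char))
        = Multiset.card ((x ::ₘ (xs : Multiset Char)) ∩ ((y :: ys : List Char) : Multiset Char)) := by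
          rw [inter_cons_left_of_notMem hnot]
      _ = Multiset.card (((x :: xs : List Char) : Multiset Char) ∩ ((y :: ys : List Char) : Multiset Char)) := by
          rw [Multiset.cons_coe]
  | case5 x xs y ys hne hnlt ih =>
    intro hx hy
    simp only [pvMergeMatched, if_neg hne, if_neg hnlt]
    rw [ih hx (List.Pairwise.of_cons hy)]
    have hyx : y < x := lt_of_le_of_ne (not_lt.mp hnlt) (fun h => hne h.symm)
    have hnot : y ∉ ((x :: xs : List Char) : Multiset Char) := by
      simp only [Multiset.mem_coe, List.mem_cons]
      rintro (rfl | hmem)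
      · exact lt_irrefl y hyx
      · exact absurd (List.rel_of_pairwise_cons hx hmem) (not_le.mpr hyx)
    calc Multiset.card (((x :: xs : List Char) : Multiset Char) ∩ (ys : Multiset Char))
        = Multiset.card (((x :: xs : List Char) : Multiset Char) ∩ (y ::ₘ (ys : Multiset Char))) := by
          rw [inter_cons_right_of_notMem hnot]
      _ = Multiset.card (((x :: xs : List Char) : Multiset Char) ∩ ((y :: ys : List Char) : Multiset Char)) := by
          rw [Multiset.cons_coe]

theorem card_sub_eq_card_sub_inter (s t : Multiset Char) :
    Multiset.card (s - t) = Multiset.card s - Multiset.card (s ∩ t) := by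
  have h : s - t = s - (s ∩ t) := by
    refine Multiset.ext.mpr fun a => ?_
    simp only [Multiset.count_sub, Multiset.count_inter]
    omega
  rw [h, Multiset.card_sub Multiset.inter_le_left]

-- the per-word conditions of A and B coincide
theorem cond_eq (init s : List Char) :
    ((pvAInner init s).2 < 2 ∧ (pvAInner init s).1.length < 2) ↔
    ((s.length : Int) - pvMergeMatched (init.mergeSort (fun c d => decide (c ≤ d)))
        (s.mergeSort (fun c d => decide (c ≤ d))) < 2 ∧
     (init.length : Int) - pvMergeMatched (init.mergeSort (fun c d => decide (c ≤ d)))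
        (s.mergeSort (fun c d => decide (c ≤ d))) < 2) := by
  obtain ⟨h1, h2⟩ := pvAInner_fold s init 0
  have hcnt : (pvAInner init s).2
      = Multiset.card ((s : Multiset Char) - (init : Multiset Char)) := by
    simpa [pvAInner] using h2
  have hlen : (pvAInner init s).1.length
      = Multiset.card ((init : Multiset Char) - (s : Multiset Char)) := by
    have := congrArg Multiset.card h1
    simpa [pvAInner, Multiset.coe_card] using this
  have hsort : ∀ l : List Char,
      ((l.mergeSort (fun c d => decide (c ≤ d)) : List Char) : Multiset Char)
        = (l : Multiset Char) :=
    fun l => Multiset.coe_eq_coe.mpr (List.mergeSort_perm l _)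
  have hmm : pvMergeMatched (init.mergeSort (fun c d => decide (c ≤ d)))
      (s.mergeSort (fun c d => decide (c ≤ d)))
      = Multiset.card ((init : Multiset Char) ∩ (s : Multiset Char)) := by
    rw [pvMergeMatched_eq_inter_card _ _
      (List.pairwise_mergeSort' (· ≤ ·) init) (List.pairwise_mergeSort' (· ≤ ·) s)]
    rw [hsort init, hsort s]
  have hks : Multiset.card ((s : Multiset Char) - (init : Multiset Char))
      = Multiset.card (s : Multiset Char)
        - Multiset.card ((init : Multiset Char) ∩ (s : Multiset Char)) := by
    rw [card_sub_eq_card_sub_inter, Multiset.inter_comm]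
  have hki : Multiset.card ((init : Multiset Char) - (s : Multiset Char))
      = Multiset.card (init : Multiset Char)
        - Multiset.card ((init : Multiset Char) ∩ (s : Multiset Char)) := by
    rw [card_sub_eq_card_sub_inter]
  have hkle1 : Multiset.card ((init : Multiset Char) ∩ (s : Multiset Char))
      ≤ Multiset.card (init : Multiset Char) :=
    Multiset.card_le_card Multiset.inter_le_left
  have hkle2 : Multiset.card ((init : Multiset Char) ∩ (s : Multiset Char))
      ≤ Multiset.card (s : Multiset Char) := by
    rw [Multiset.inter_comm]
    exact Multiset.card_le_card Multiset.inter_le_left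
  rw [hcnt, hlen, hmm, hks, hki]
  simp only [Multiset.coe_card] at *
  constructor
  · rintro ⟨ha, hb⟩
    constructor <;> omega
  · rintro ⟨ha, hb⟩
    constructor <;> omega

-- ===== VERDICT (by name: the statement is the Claim_ definition above) =====
theorem solution_spec : Claim_equal_solution := by
  intro N S _hDom hPre
  unfold Spec_solution
  cases S with
  | nil => exact absurd rfl hPre
  | cons init rest =>
    simp only [solution, solution_alt]
    apply List.foldl_ext
    intro ans s _hs
    dsimp only
    have h := cond_eq init.toList s.toList
    by_cases hca : (pvAInner init.toList s.toList).2 < 2 ∧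
        (pvAInner init.toList s.toList).1.length < 2
    · rw [if_pos hca, if_pos (h.mp hca)]
    · rw [if_neg hca, if_neg (fun hb => hca (h.mpr hb))]
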